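-- pv_equiv track=rewrite | github.com/jwun95/algorithm | 백준/Silver/1541. 잃어버린 괄호/잃어버린 괄호.py | solution
-- ===== SOURCE A (Python) =====
-- def solution(inputValue):
--     answer = 0
--
--     expressions = inputValue.split("-")
--     minusList = []
--     temp = ""
--
--     for expression in expressions:
--         stack = 0
--         for e in expression:
--             if e == "+":
--                 stack += int(temp)
--                 temp = ""
--
--             else:
--                 temp += e
--
--         stack += int(temp)
--         minusList.append(stack)
--         stack = 0
--         temp = ""
--
--     answer = minusList[0]
--
--     if len(minusList) > 1:
--         for m in range(1, len(minusList)):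
--             answer -= minusList[m]
--
--     return answer
-- ===== SOURCE B (Python) =====
-- def solution(inputValue):
--     vals = [sum(int(x) for x in group.split("+")) for group in inputValue.split("-")]
--     return vals[0] - sum(vals[1:])
-- ===== Notes on version B (the rewrite author's own statement) =====
-- stated objective: simpler
-- what changed: Replaces A's character-by-character temp-buffer tokenizer and explicit index loop over minusList with token-level splitting on the plus sign and a per-group sum, returning the first group value minus the sum of the remaining group values.
import Mathlib
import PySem

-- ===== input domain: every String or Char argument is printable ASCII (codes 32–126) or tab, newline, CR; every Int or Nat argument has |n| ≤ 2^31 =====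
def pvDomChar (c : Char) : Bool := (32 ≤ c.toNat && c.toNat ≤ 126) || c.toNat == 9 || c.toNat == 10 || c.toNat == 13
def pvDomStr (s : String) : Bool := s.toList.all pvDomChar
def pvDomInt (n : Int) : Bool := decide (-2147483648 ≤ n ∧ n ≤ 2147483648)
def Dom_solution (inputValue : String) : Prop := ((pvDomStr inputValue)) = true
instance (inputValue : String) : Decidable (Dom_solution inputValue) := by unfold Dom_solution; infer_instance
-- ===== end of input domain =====

-- B replaces A's character-by-character temp-buffer tokenizer and index loop with
-- token-level splitting and a per-group sum, then first value minus sum of the rest (simpler; same cost).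
-- Both Pythons split strings; the ports split on the List Char side (PySem.Chars.splitOn, exact).

-- ===== PORT A =====
-- inner loop body: 'for e in expression: if e == "+": stack += int(temp); temp = "" else: temp += e'
-- (Option threads Python's ValueError from int(temp); none = A raises, excluded by Pre_)
def pvAChar (st : Option (Int × List Char)) (e : Char) : Option (Int × List Char) :=
  match st with
  | none => none
  | some (stack, temp) =>
    if e = '+' then (PySem.Int.ofChars? temp).map (fun v => (stack + v, ([] : List Char)))
    else some (stack, temp ++ [e])

-- outer loop body: per expression, run the char loop, then 'stack += int(temp); minusList.append(stack); temp = ""'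
def pvAGroup (st : Option (List Int × List Char)) (expression : List Char) : Option (List Int × List Char) :=
  match st with
  | none => none
  | some (ml, temp) =>
    match expression.foldl pvAChar (some (0, temp)) with
    | none => none
    | some (stack, temp') =>
      match PySem.Int.ofChars? temp' with
      | none => none
      | some v => some (ml ++ [stack + v], ([] : List Char))

def solution (inputValue : String) : Int :=
  let expressions := PySem.Chars.splitOn inputValue.toList ['-']
  match expressions.foldl pvAGroup (some ([], ([] : List Char))) with
  | none => 0   -- Python raises ValueError here; outside Pre_solution
  | some (minusList, _) =>
    let answer := PySem.List.pyGetD minusList 0 0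
    if 1 < minusList.length then
      (PySem.List.pyRange 1 (minusList.length : Int) 1).foldl
        (fun ans m => ans - PySem.List.pyGetD minusList m 0) answer
    else answer

-- ===== PORT B =====
-- Source B: per group of the minus-split, sum the ints of its plus-split tokens;
-- then return the first group value minus the sum of the remaining ones
-- (int(x) raising is outside Pre_solution; getD 0 is never taken there)
def pvBGroupVal (group : List Char) : Int :=
  ((PySem.Chars.splitOn group ['+']).map (fun t => (PySem.Int.ofChars? t).getD 0)).sum

def solution_alt (inputValue : String) : Int :=
  let vals := (PySem.Chars.splitOn inputValue.toList ['-']).map pvBGroupVal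
  PySem.List.pyGetD vals 0 0 - (PySem.List.slice vals (some 1) none).sum

-- ===== PRECONDITION & SPEC =====
-- Pre_ excludes exactly the inputs where Python's int() raises ValueError on some token
-- (empty token from leading/trailing/doubled operators, or a non-numeric token): A raises there.
def Pre_solution (inputValue : String) : Prop :=
  ∀ g ∈ PySem.Chars.splitOn inputValue.toList ['-'],
    ∀ t ∈ PySem.Chars.splitOn g ['+'], (PySem.Int.ofChars? t).isSome = true
instance (inputValue : String) : Decidable (Pre_solution inputValue) := by
  unfold Pre_solution; infer_instance

def pvWitness_solution : String := "55-50+40"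

def Spec_solution (inputValue : String) (out : Int) : Prop := out = solution_alt inputValue
instance (inputValue : String) (out : Int) : Decidable (Spec_solution inputValue out) := by
  unfold Spec_solution; infer_instance

-- ===== CLAIM (what is proved, stated in full; the proofs are below) =====
def Claim_equal_solution : Prop :=
  ∀ (inputValue : String), Dom_solution inputValue → Pre_solution inputValue →
    Spec_solution inputValue (solution inputValue)

-- ===== LEMMAS AND PROOFS =====

-- prepend a prefix onto the first token (the [] case is unreachable: pvToksBy is never [])
def pvConsHead (p : List Char) : List (List Char) → List (List Char)
  | [] => [p]
  | t :: ts => (p ++ t) :: ts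

-- left-to-right single-character-separator split, structurally
def pvToksBy (d : Char) : List Char → List (List Char)
  | [] => [[]]
  | c :: cs => if c = d then [] :: pvToksBy d cs else pvConsHead [c] (pvToksBy d cs)

lemma pvToksBy_ne_nil (d : Char) (cs : List Char) : pvToksBy d cs ≠ [] := by
  cases cs with
  | nil => simp [pvToksBy]
  | cons c cs =>
    simp only [pvToksBy]
    split
    · simp
    · cases h : pvToksBy d cs <;> simp [pvConsHead]

lemma pvConsHead_consHead (p q : List Char) (ts : List (List Char)) (h : ts ≠ []) :
    pvConsHead p (pvConsHead q ts) = pvConsHead (p ++ q) ts := by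
  cases ts with
  | nil => exact absurd rfl h
  | cons t ts => simp [pvConsHead]

lemma pvConsHead_nil (ts : List (List Char)) (h : ts ≠ []) : pvConsHead [] ts = ts := by
  cases ts with
  | nil => exact absurd rfl h
  | cons t ts => simp [pvConsHead]

lemma pvGo_spec (d : Char) :
    ∀ (l : List Char) (fuel : Nat) (cur : List Char) (acc : List (List Char)),
      l.length < fuel →
      PySem.Chars.splitOn.go [d] fuel l cur acc
        = acc.reverse ++ pvConsHead cur.reverse (pvToksBy d l) := by
  intro l
  induction l with
  | nil =>
    intro fuel cur acc h
    match fuel with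
    | f + 1 => simp [PySem.Chars.splitOn.go, pvToksBy, pvConsHead]
  | cons c rest ih =>
    intro fuel cur acc h
    match fuel with
    | f + 1 =>
      simp only [PySem.Chars.splitOn.go]
      by_cases hc : c = d
      · have hp : List.isPrefixOf [d] (c :: rest) = true := by simp [List.isPrefixOf, hc]
        rw [if_pos hp]
        simp only [List.length_cons, List.length_nil, List.drop_succ_cons, List.drop_zero]
        rw [ih f [] (cur.reverse :: acc) (Nat.lt_of_succ_lt_succ h)]
        rw [List.reverse_nil, pvConsHead_nil _ (pvToksBy_ne_nil d rest)]
        simp [pvToksBy, if_pos hc, pvConsHead]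
      · have hp : List.isPrefixOf [d] (c :: rest) = false := by
          simp [List.isPrefixOf]; exact fun hdc => absurd hdc.symm hc
        rw [if_neg (by simp [hp])]
        rw [ih f (c :: cur) acc (Nat.lt_of_succ_lt_succ h)]
        simp only [pvToksBy, if_neg hc]
        rw [pvConsHead_consHead _ _ _ (pvToksBy_ne_nil d rest)]
        simp

lemma pvSplitOn_single (d : Char) (cs : List Char) :
    PySem.Chars.splitOn cs [d] = pvToksBy d cs := by
  unfold PySem.Chars.splitOn
  rw [pvGo_spec d cs (cs.length + 1) [] [] (Nat.lt_succ_self _)]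
  simp [pvConsHead_nil _ (pvToksBy_ne_nil d cs)]

-- sum of int(t) over the tokens, none as soon as one token fails to parse
def pvSumToks? : List (List Char) → Option Int
  | [] => some 0
  | t :: ts => (PySem.Int.ofChars? t).bind (fun v => (pvSumToks? ts).map (fun s => v + s))

lemma pvFoldl_pvAChar_none (cs : List Char) : cs.foldl pvAChar none = none := by
  induction cs with
  | nil => rfl
  | cons c cs ih => simpa [pvAChar] using ih

-- A's inner character loop, summarised against token-level splitting
lemma pvInner :
    ∀ (cs : List Char) (stack : Int) (temp : List Char),
      (cs.foldl pvAChar (some (stack, temp))).bind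
          (fun p => (PySem.Int.ofChars? p.2).map (fun v => p.1 + v))
        = (pvSumToks? (pvConsHead temp (pvToksBy '+' cs))).map (fun s => stack + s) := by
  intro cs
  induction cs with
  | nil =>
    intro stack temp
    simp only [List.foldl_nil, Option.bind_some, pvToksBy, pvConsHead, pvSumToks?]
    cases h : PySem.Int.ofChars? temp <;> simp [h]
  | cons c cs ih =>
    intro stack temp
    by_cases hc : c = '+'
    · subst hc
      simp only [List.foldl_cons, pvAChar, reduceIte]
      simp only [pvToksBy, reduceIte]
      simp only [pvConsHead, List.append_nil]
      cases h : PySem.Int.ofChars? temp with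
      | none =>
        simp only [Option.map_none]
        rw [pvFoldl_pvAChar_none]
        simp [pvSumToks?, h]
      | some v =>
        simp only [Option.map_some]
        rw [ih (stack + v) []]
        rw [pvConsHead_nil _ (pvToksBy_ne_nil '+' cs)]
        simp only [pvSumToks?, h, Option.bind_some]
        cases hs : pvSumToks? (pvToksBy '+' cs) <;> simp <;> ring_nf
    · simp only [List.foldl_cons, pvAChar, if_neg hc]
      rw [ih stack (temp ++ [c])]
      simp only [pvToksBy, if_neg hc]
      rw [pvConsHead_consHead _ _ _ (pvToksBy_ne_nil '+' cs)]

lemma pvSumToks?_of_all_some (ts : List (List Char))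
    (h : ∀ t ∈ ts, (PySem.Int.ofChars? t).isSome = true) :
    pvSumToks? ts = some ((ts.map (fun t => (PySem.Int.ofChars? t).getD 0)).sum) := by
  induction ts with
  | nil => simp [pvSumToks?]
  | cons t ts ih =>
    have ht := h t (by simp)
    obtain ⟨v, hv⟩ := Option.isSome_iff_exists.mp ht
    rw [pvSumToks?, hv, ih (fun t' ht' => h t' (by simp [ht']))]
    simp [hv]

-- one group of A's outer loop produces B's group value
lemma pvAGroup_eq (ml : List Int) (g : List Char)
    (h : ∀ t ∈ PySem.Chars.splitOn g ['+'], (PySem.Int.ofChars? t).isSome = true) :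
    pvAGroup (some (ml, [])) g = some (ml ++ [pvBGroupVal g], []) := by
  have hin := pvInner g 0 []
  rw [pvConsHead_nil _ (pvToksBy_ne_nil '+' g)] at hin
  rw [pvSplitOn_single '+' g] at h
  rw [pvSumToks?_of_all_some _ h] at hin
  simp only [Option.map_some, zero_add] at hin
  cases hf : g.foldl pvAChar (some (0, [])) with
  | none => rw [hf] at hin; simp at hin
  | some p =>
    obtain ⟨stack, temp'⟩ := p
    rw [hf] at hin
    simp only [Option.bind_some] at hin
    cases hoc : PySem.Int.ofChars? temp' with
    | none => rw [hoc] at hin; simp at hin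
    | some v =>
      rw [hoc] at hin
      simp only [Option.map_some, Option.some_inj] at hin
      simp only [pvAGroup, hf, hoc]
      simp [pvBGroupVal, pvSplitOn_single, ← hin]

lemma pvOuter (gs : List (List Char))
    (h : ∀ g ∈ gs, ∀ t ∈ PySem.Chars.splitOn g ['+'], (PySem.Int.ofChars? t).isSome = true) :
    ∀ ml : List Int,
      gs.foldl pvAGroup (some (ml, [])) = some (ml ++ gs.map pvBGroupVal, []) := by
  induction gs with
  | nil => intro ml; simp
  | cons g gs ih =>
    intro ml
    simp only [List.foldl_cons, List.map_cons]
    rw [pvAGroup_eq ml g (h g (by simp))]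
    rw [ih (fun g' hg' => h g' (by simp [hg'])) (ml ++ [pvBGroupVal g])]
    simp

lemma pvFoldl_sub (l : List Int) : ∀ a : Int, l.foldl (fun x y => x - y) a = a - l.sum := by
  induction l with
  | nil => simp
  | cons x l ih => intro a; simp only [List.foldl_cons, List.sum_cons, ih]; ring

-- A's answer loop over minusList equals B's head-minus-tail-sum
lemma pvFinal (ml : List Int) (hne : ml ≠ []) :
    (if 1 < ml.length then
        (PySem.List.pyRange 1 (ml.length : Int) 1).foldl
          (fun ans m => ans - PySem.List.pyGetD ml m 0) (PySem.List.pyGetD ml 0 0)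
      else PySem.List.pyGetD ml 0 0)
    = PySem.List.pyGetD ml 0 0 - (PySem.List.slice ml (some 1) none).sum := by
  rw [PySem.List.slice_from_one, ← List.drop_one]
  by_cases hlen : 1 < ml.length
  · rw [if_pos hlen,
      PySem.List.foldl_pyRange_pyGetD' ml 0 (fun x y => x - y) (PySem.List.pyGetD ml 0 0)
        (a := 1) (by omega)]
    simp [pvFoldl_sub]
  · rw [if_neg hlen]
    have hd : ml.drop 1 = [] := List.drop_eq_nil_iff.mpr (by
      cases ml with
      | nil => exact absurd rfl hne
      | cons x xs => simp at hlen ⊢; omega)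
    simp [hd]

-- ===== VERDICT (by name: the statement is the Claim_ definition above) =====
theorem solution_spec : Claim_equal_solution := by
  intro s _ hpre
  unfold Spec_solution solution solution_alt
  simp only []
  rw [pvOuter _ hpre []]
  simp only [List.nil_append]
  exact pvFinal _ (by
    rw [pvSplitOn_single]
    simp [pvToksBy_ne_nil '-' s.toList])
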